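-- pv_equiv track=rewrite | github.com/ltekean/Coding-Test | 프로그래머스/unrated/135808. 과일 장수/과일 장수.py | solution
-- ===== SOURCE A (Python) =====
-- def solution(k, m, score):
--     answer = 0
--     score.sort(reverse=True)
--     my_list=[]
--
--     for i in score:
--         my_list.append(i)
--         if len(my_list) == m:
--             answer+=m*my_list[-1]
--             my_list=[]
--     return answer
-- ===== SOURCE B (Python) =====
-- def solution(k, m, score):
--     # Sort descending in place (same observable mutation as the original),
--     # then read each complete box's minimum directly by stride indexing:
--     # after a descending sort, box j's minimum sits at index (j+1)*m - 1.
--     score.sort(reverse=True)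
--     boxes = len(score) // m
--     return m * sum(score[i] for i in range(m - 1, boxes * m, m))
-- ===== Notes on version B (the rewrite author's own statement) =====
-- stated objective: simpler
-- what changed: Instead of accumulating each box in a temporary list and closing it when it reaches length m, B sorts descending and reads each complete box's minimum directly by stride indexing (indices m-1, 2m-1, ...), summing them in one comprehension.
-- outside the precondition, e.g. on solution(0, 0, [1, 2]): A returns 0, B raises ZeroDivisionError
import Mathlib
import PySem

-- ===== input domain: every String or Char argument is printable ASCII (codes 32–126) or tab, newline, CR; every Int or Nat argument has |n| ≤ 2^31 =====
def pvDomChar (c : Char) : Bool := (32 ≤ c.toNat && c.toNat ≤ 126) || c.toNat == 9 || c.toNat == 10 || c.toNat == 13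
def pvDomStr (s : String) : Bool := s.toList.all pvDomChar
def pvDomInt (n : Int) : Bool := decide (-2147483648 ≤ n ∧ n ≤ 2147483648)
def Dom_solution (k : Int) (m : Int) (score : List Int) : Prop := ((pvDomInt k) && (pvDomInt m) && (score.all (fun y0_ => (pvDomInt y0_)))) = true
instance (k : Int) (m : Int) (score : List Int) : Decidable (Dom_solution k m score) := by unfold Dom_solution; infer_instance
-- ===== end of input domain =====

-- B replaces A's temporary-list accumulation with direct stride indexing of the
-- box minima after the descending sort (objective: simpler). Both versions sort
-- `score` in place in Python; the equivalence proved here is about the return value.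

-- ===== PORT A =====
-- loop body of A's for-loop: append i to my_list, close the box when it reaches size m
def stepA (m : Int) (st : Int × List Int) (i : Int) : Int × List Int :=
  let ml := st.2 ++ [i]
  if (ml.length : Int) = m then (st.1 + m * PySem.List.pyGetD ml (-1) 0, [])
  else (st.1, ml)

def solution (k : Int) (m : Int) (score : List Int) : Int :=
  let s := PySem.List.sorted score (fun x => x) true
  (s.foldl (stepA m) (0, [])).1

-- ===== PORT B =====
def solution_alt (k : Int) (m : Int) (score : List Int) : Int :=
  let s := PySem.List.sorted score (fun x => x) true
  let boxes := PySem.Int.floordiv (s.length : Int) m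
  m * ((PySem.List.pyRange (m - 1) (boxes * m) m).foldl
        (fun acc i => acc + PySem.List.pyGetD s i 0) 0)

-- ===== PRECONDITION & SPEC =====
-- Pre_ excludes only m = 0, the single input shape outside the task's natural
-- domain (box size must be positive): there A accidentally returns 0 while B's
-- division by the box size raises ZeroDivisionError.
def Pre_solution (k : Int) (m : Int) (score : List Int) : Prop := m ≠ 0
instance (k : Int) (m : Int) (score : List Int) : Decidable (Pre_solution k m score) := by unfold Pre_solution; infer_instance
def pvWitness_solution : Int × Int × List Int := (4, 3, [1, 2, 3, 1, 2, 3, 1])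
def Spec_solution (k : Int) (m : Int) (score : List Int) (out : Int) : Prop := out = solution_alt k m score
instance (k : Int) (m : Int) (score : List Int) (out : Int) : Decidable (Spec_solution k m score out) := by unfold Spec_solution; infer_instance

-- ===== CLAIM (what is proved, stated in full; the proofs are below) =====
def Claim_equal_solution : Prop := ∀ (k : Int) (m : Int) (score : List Int), Dom_solution k m score → Pre_solution k m score → Spec_solution k m score (solution k m score)

-- ===== LEMMAS AND PROOFS =====

-- m·(minimum of each complete leading box of size mn), the common value of both programs.
def chunk (mn : Nat) (l : List Int) : Int :=
  if 1 ≤ mn ∧ mn ≤ l.length then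
    (mn : Int) * l.getD (mn - 1) 0 + chunk mn (l.drop mn)
  else 0
termination_by l.length
decreasing_by simp; omega

theorem chunk_neg (mn : Nat) (l : List Int) (h : ¬ (1 ≤ mn ∧ mn ≤ l.length)) :
    chunk mn l = 0 := by
  rw [chunk, if_neg h]

theorem chunk_pos (mn : Nat) (l : List Int) (h : 1 ≤ mn ∧ mn ≤ l.length) :
    chunk mn l = (mn : Int) * l.getD (mn - 1) 0 + chunk mn (l.drop mn) := by
  rw [chunk, if_pos h]

theorem getD_drop (l : List Int) (n i : Nat) (d : Int) :
    (l.drop n).getD i d = l.getD (n + i) d := by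
  simp [List.getD, List.getElem?_drop]

theorem sub_div_self (a b : Nat) (h : b ≤ a) (hb : 0 < b) : (a - b) / b = a / b - 1 := by
  rcases Nat.exists_eq_add_of_le h with ⟨c, rfl⟩
  rw [Nat.add_sub_cancel_left, Nat.add_comm b c, Nat.add_div_right _ hb]
  simp

-- A's loop, from any accumulator and any partial box shorter than mn,
-- adds exactly the chunk value of (buffer ++ remaining input).
theorem foldA (m : Int) (mn : Nat) (hm : m = (mn : Int)) (h1 : 1 ≤ mn) :
    ∀ (l : List Int) (a : Int) (buf : List Int), buf.length < mn →
      (l.foldl (stepA m) (a, buf)).1 = a + chunk mn (buf ++ l) := by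
  intro l
  induction l with
  | nil =>
    intro a buf hb
    simp [chunk_neg mn buf (by omega)]
  | cons x l ih =>
    intro a buf hb
    rw [List.foldl_cons]
    by_cases hc : buf.length + 1 = mn
    · have hstep : stepA m (a, buf) x = (a + m * x, []) := by
        unfold stepA
        rw [if_pos (by simp [hm]; omega)]
        rw [PySem.List.pyGetD_neg_one_append_singleton]
      rw [hstep, ih (a + m * x) [] (by simp only [List.length_nil]; omega)]
      have hlen : (buf ++ [x]).length = mn := by simp; omega
      have hchunk : chunk mn (buf ++ x :: l) = (mn : Int) * x + chunk mn l := by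
        rw [chunk_pos mn _ ⟨h1, by simp; omega⟩]
        have e1 : buf ++ x :: l = (buf ++ [x]) ++ l := by simp
        have e2 : (buf ++ x :: l).getD (mn - 1) 0 = x := by
          have : mn - 1 = buf.length := by omega
          rw [this]
          simp [List.getD]
        rw [e2, e1, List.drop_left' hlen]
      rw [List.nil_append, hchunk, hm]; ring
    · have hstep : stepA m (a, buf) x = (a, buf ++ [x]) := by
        unfold stepA
        rw [if_neg (by simp [hm]; omega)]
      rw [hstep, ih a (buf ++ [x]) (by simp; omega)]
      simp

-- chunk as a sum of the strided minima, one per complete box.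
theorem chunk_eq_strideSum (mn : Nat) (h1 : 1 ≤ mn) :
    ∀ (q : Nat) (l : List Int), q = l.length / mn →
      chunk mn l = (mn : Int) * ((List.range q).map (fun j => l.getD (j * mn + (mn - 1)) 0)).sum := by
  intro q
  induction q with
  | zero =>
    intro l hq
    have : l.length < mn := by
      by_contra h
      have := Nat.div_le_div_right (c := mn) (Nat.le_of_not_lt h)
      rw [Nat.div_self (by omega)] at this
      omega
    simp [chunk_neg mn l (by omega)]
  | succ q ih =>
    intro l hq
    have hle : mn ≤ l.length := by
      by_contra h
      rw [Nat.div_eq_of_lt (by omega)] at hq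
      omega
    have hdrop : q = (l.drop mn).length / mn := by
      rw [List.length_drop, sub_div_self _ _ hle (by omega)]
      omega
    rw [chunk_pos mn l ⟨h1, hle⟩, ih (l.drop mn) hdrop]
    rw [List.range_succ_eq_map, List.map_cons, List.map_map, List.sum_cons]
    have e0 : (0 : Nat) * mn + (mn - 1) = mn - 1 := by omega
    have emap : ∀ j : Nat, (l.drop mn).getD (j * mn + (mn - 1)) 0
        = l.getD (Nat.succ j * mn + (mn - 1)) 0 := by
      intro j
      rw [getD_drop]
      congr 1
      simp [Nat.succ_mul]; omega
    simp only [e0, Function.comp_def]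
    rw [show (List.map (fun x => l.getD (Nat.succ x * mn + (mn - 1)) 0) (List.range q)).sum
        = (List.map (fun x => (l.drop mn).getD (x * mn + (mn - 1)) 0) (List.range q)).sum
      from by simp only [emap]]
    ring

-- B's port, for positive m, computes chunk of the sorted list.
theorem altB (k m : Int) (score : List Int) (mn : Nat) (hm : m = (mn : Int)) (h1 : 1 ≤ mn) :
    solution_alt k m score = chunk mn (PySem.List.sorted score (fun x => x) true) := by
  unfold solution_alt
  dsimp only
  set s := PySem.List.sorted score (fun x => x) true with hs
  set q : Nat := s.length / mn with hqdef
  have hfd : PySem.Int.floordiv (s.length : Int) m = (q : Int) := by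
    rw [hm]; exact_mod_cast PySem.Int.floordiv_natCast s.length mn
  rw [hfd]
  have hstep : (0 : Int) < m := by omega
  rw [PySem.List.pyRange_of_pos _ _ hstep]
  have hcnt : (if m - 1 < (q : Int) * m then (((q : Int) * m - (m - 1) + m - 1) / m).toNat else 0) = q := by
    by_cases hq : 1 ≤ q
    · subst hm
      rw [if_pos (by nlinarith)]
      have e : ((q : Int) * mn - ((mn : Int) - 1) + mn - 1) = (q : Int) * mn := by ring
      rw [e, Int.mul_ediv_cancel _ (by exact_mod_cast (by omega : mn ≠ 0))]
      simp
    · have hq0 : q = 0 := Nat.eq_zero_of_not_pos hq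
      rw [hq0]
      rw [if_neg (by simp; omega)]
  rw [hcnt, List.foldl_map, PySem.List.foldl_add]
  have hidx : ∀ j : Nat, PySem.List.pyGetD s (m - 1 + m * (j : Int)) 0 = s.getD (j * mn + (mn - 1)) 0 := by
    intro j
    have e : m - 1 + m * (j : Int) = ((j * mn + (mn - 1) : Nat) : Int) := by
      subst hm; push_cast [Nat.cast_sub h1]; ring
    rw [e, PySem.List.pyGetD_natCast]
  simp only [hidx, zero_add]
  rw [chunk_eq_strideSum mn h1 q s hqdef, hm]

-- For negative m, A's box-completion test never fires and the accumulator stays put.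
theorem foldA_neg (m : Int) (hm : m < 0) :
    ∀ (l : List Int) (a : Int) (buf : List Int),
      (l.foldl (stepA m) (a, buf)).1 = a := by
  intro l
  induction l with
  | nil => intro a buf; rfl
  | cons x l ih =>
    intro a buf
    rw [List.foldl_cons]
    have hstep : stepA m (a, buf) x = (a, buf ++ [x]) := by
      unfold stepA
      rw [if_neg (by simp; omega)]
    rw [hstep]
    exact ih a (buf ++ [x])

-- For negative m, B's strided range is empty (its stop is nonnegative, its start below m).
theorem altB_neg (k m : Int) (score : List Int) (hm : m < 0) :
    solution_alt k m score = 0 := by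
  unfold solution_alt
  dsimp only
  set s := PySem.List.sorted score (fun x => x) true with hs
  have hstop : 0 ≤ PySem.Int.floordiv (s.length : Int) m * m := by
    have h1 := PySem.Int.floordiv_mul_add_mod (s.length : Int) m
    have h2 := PySem.Int.mod_neg_bounds (a := (s.length : Int)) (b := m) hm
    have h3 : (0 : Int) ≤ (s.length : Int) := by positivity
    omega
  have hempty : PySem.List.pyRange (m - 1) (PySem.Int.floordiv (s.length : Int) m * m) m = [] := by
    unfold PySem.List.pyRange
    rw [if_neg (by omega)]
    rw [if_neg (by omega), if_neg (by omega)]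
    simp
  rw [hempty]
  simp

-- ===== VERDICT (by name: the statement is the Claim_ definition above) =====
theorem solution_spec : Claim_equal_solution := by
  intro k m score _ hpre
  unfold Spec_solution Pre_solution at *
  by_cases hpos : 0 < m
  · have hm : m = (m.toNat : Int) := by omega
    have h1 : 1 ≤ m.toNat := by omega
    rw [altB k m score m.toNat hm h1]
    unfold solution
    rw [foldA m m.toNat hm h1 _ 0 [] (by simp only [List.length_nil]; omega)]
    simp
  · have hneg : m < 0 := by omega
    rw [altB_neg k m score hneg]
    unfold solution
    rw [foldA_neg m hneg]
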